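-- pv_equiv track=rewrite | github.com/KylieLAnglin/dofis | exemptions/extract_dates.py | get_latest_month
-- ===== SOURCE A (Python) =====
-- def get_latest_month(month_list):
--     month = ''
--     subs = {'Spring': 1, 'Summer': 2, 'Fall': 3, 'Winter': 4,
--             'January': 5, 'February': 6, 'March': 7, 'April': 8, 'May': 9, 'June': 10, 'July': 11,
--             'August': 12, 'September': 13, 'October': 14, 'November': 15, 'December': 16}
--     value_list = []
--     if month_list:
--         for m in month_list:
--             value_list.append(subs.get(m, 0))
--         loc = value_list.index(max(value_list))
--         month = str(month_list[loc])
--     return month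
-- ===== SOURCE B (Python) =====
-- def get_latest_month(month_list):
--     subs = {'Spring': 1, 'Summer': 2, 'Fall': 3, 'Winter': 4,
--             'January': 5, 'February': 6, 'March': 7, 'April': 8, 'May': 9, 'June': 10, 'July': 11,
--             'August': 12, 'September': 13, 'October': 14, 'November': 15, 'December': 16}
--     best = None
--     month = ''
--     for m in month_list:
--         v = subs.get(m, 0)
--         if best is None or v > best:
--             best, month = v, m
--     return month
-- ===== Notes on version B (the rewrite author's own statement) =====
-- stated objective: simpler
-- what changed: Replaced the three-pass build-value-list / max() / .index() structure by a single linear scan that keeps a running best rank and its month; strict > preserves the first-occurrence tie-break and the empty list still yields ''.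
import Mathlib
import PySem

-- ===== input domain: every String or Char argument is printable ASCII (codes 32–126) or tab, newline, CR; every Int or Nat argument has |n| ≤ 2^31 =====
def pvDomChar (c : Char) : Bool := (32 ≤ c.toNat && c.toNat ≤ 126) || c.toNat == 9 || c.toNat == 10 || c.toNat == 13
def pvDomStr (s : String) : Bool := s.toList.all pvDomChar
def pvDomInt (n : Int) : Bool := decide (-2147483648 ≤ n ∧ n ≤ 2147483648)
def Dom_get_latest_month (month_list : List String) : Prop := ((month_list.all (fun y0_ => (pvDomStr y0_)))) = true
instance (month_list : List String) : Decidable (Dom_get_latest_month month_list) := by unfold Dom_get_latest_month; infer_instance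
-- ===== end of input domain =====

-- B replaces A's three passes (build rank list, max(), .index()) by one scan keeping the running best rank and its month; same result, simpler.

-- shared helper: the seasonal-rank dictionary both Pythons define verbatim
def pvSubs : PySem.Dict String Int :=
  PySem.Dict.ofList [("Spring", 1), ("Summer", 2), ("Fall", 3), ("Winter", 4),
    ("January", 5), ("February", 6), ("March", 7), ("April", 8), ("May", 9), ("June", 10),
    ("July", 11), ("August", 12), ("September", 13), ("October", 14), ("November", 15), ("December", 16)]

-- ===== PORT A =====
def get_latest_month (month_list : List String) : String :=
  let month : String := ""
  let value_list : List Int := month_list.foldl (fun acc m => acc ++ [pvSubs.getD m 0]) []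
  if month_list ≠ [] then
    match PySem.List.max? value_list (fun v => v) with
    | none => month          -- unreachable: value_list nonempty
    | some mx =>
      match PySem.List.index? value_list mx with
      | none => month        -- unreachable: mx ∈ value_list
      | some loc =>
        match PySem.List.pyGet? month_list (loc : Int) with
        | none => month      -- unreachable: loc < length
        | some s => s        -- str(month_list[loc]) of a string is itself
  else month

-- ===== PORT B =====
-- the loop body of Source B's single scan
def pvStepB (st : Option Int × String) (m : String) : Option Int × String :=
  let v : Int := pvSubs.getD m 0
  match st.1 with
  | none => (some v, m)
  | some b => if b < v then (some v, m) else st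

def get_latest_month_alt (month_list : List String) : String :=
  (month_list.foldl pvStepB (none, "")).2

-- ===== PRECONDITION & SPEC =====
def Spec_get_latest_month (month_list : List String) (out : String) : Prop := out = get_latest_month_alt month_list
instance (month_list : List String) (out : String) : Decidable (Spec_get_latest_month month_list out) := by unfold Spec_get_latest_month; infer_instance

-- ===== CLAIM (what is proved, stated in full; the proofs are below) =====
def Claim_equal_get_latest_month : Prop := ∀ (month_list : List String), Dom_get_latest_month month_list → Spec_get_latest_month month_list (get_latest_month month_list)

-- ===== LEMMAS AND PROOFS =====

-- the rank of one month
def pvF (m : String) : Int := pvSubs.getD m 0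

-- the running maximum of ranks starting from (the rank of) m
def pvM (m : String) (rest : List String) : Int := (rest.map pvF).foldl max (pvF m)

-- the first month of m :: rest achieving the maximal rank (reference recursion)
def pvPick (m : String) : List String → String
  | [] => m
  | x :: t => if pvF m < pvF x then pvPick x t else pvPick m t

lemma pvM_cons (m x : String) (t : List String) :
    pvM m (x :: t) = pvM (if pvF m < pvF x then x else m) t := by
  simp only [pvM, List.map, List.foldl]
  split_ifs with h
  · congr 1; omega
  · congr 1; omega

lemma pvF_le_pvM (m : String) (rest : List String) : pvF m ≤ pvM m rest := by
  induction rest generalizing m with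
  | nil => simp [pvM]
  | cons x t ih =>
    rw [pvM_cons]
    split_ifs with h
    · exact le_of_lt (lt_of_lt_of_le h (ih x))
    · exact ih m

-- A's three-pass core on a nonempty list returns pvPick
lemma indexA (rest : List String) : ∀ m : String, ∃ loc : Nat,
    PySem.List.index? ((m :: rest).map pvF) (pvM m rest) = some loc ∧
    PySem.List.pyGet? (m :: rest) (loc : Int) = some (pvPick m rest) := by
  induction rest with
  | nil =>
    intro m
    refine ⟨0, ?_, ?_⟩
    · simp only [List.map_cons, List.map_nil, pvM, List.foldl]
      exact PySem.List.index?_cons_self (pvF m) []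
    · simp [pvPick]
  | cons x t ih =>
    intro m
    by_cases h : pvF m < pvF x
    · -- head is strictly beaten: max lives in x :: t, index shifts by one
      obtain ⟨loc, hidx, hget⟩ := ih x
      have hne : pvF m ≠ pvM x t := by
        have := pvF_le_pvM x t; omega
      refine ⟨loc + 1, ?_, ?_⟩
      · rw [pvM_cons, if_pos h, List.map_cons]
        rw [PySem.List.index?_cons_of_ne ((x :: t).map pvF) hne, hidx]
        rfl
      · have e := PySem.List.pyGet?_cons_succ m (x :: t) loc
        rw [pvPick, if_pos h]
        push_cast
        rw [e, hget]
    · -- head survives: compare with index? on m :: t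
      obtain ⟨loc, hidx, hget⟩ := ih m
      have hMc : pvM m (x :: t) = pvM m t := by rw [pvM_cons, if_neg h]
      simp only [List.map_cons] at hidx
      cases loc with
      | zero =>
        -- the overall max IS the head's rank
        have hm : pvF m = pvM m t := by
          rcases (PySem.List.index?_eq_some_iff _ _ _).mp hidx with ⟨pre, suf, heq, hlen, _⟩
          have hp : pre = [] := List.eq_nil_of_length_eq_zero hlen
          subst hp
          simp only [List.nil_append, List.cons.injEq] at heq
          exact heq.1
        refine ⟨0, ?_, ?_⟩
        · rw [hMc, ← hm, List.map_cons]
          exact PySem.List.index?_cons_self (pvF m) ((x :: t).map pvF)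
        · have hmm : pvPick m t = m := by
            have := hget; simp at this; exact this.symm
          simp [PySem.List.pyGet?_zero_cons, pvPick, if_neg h, hmm]
      | succ k =>
        -- the max beats the head strictly, hence also beats x
        have hmne : pvF m ≠ pvM m t := by
          intro hc
          have h0 := PySem.List.index?_cons_self (pvF m) (t.map pvF)
          rw [hc] at h0 hidx
          rw [h0] at hidx
          simp at hidx
        have hxne : pvF x ≠ pvM m t := by
          have h1 := pvF_le_pvM m t
          intro hc
          omega
        have hidx_t : PySem.List.index? (t.map pvF) (pvM m t) = some k := by
          have s0 := PySem.List.index?_cons_of_ne (t.map pvF) hmne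
          rw [hidx] at s0
          cases hk : PySem.List.index? (t.map pvF) (pvM m t) with
          | none => rw [hk] at s0; simp at s0
          | some j =>
            rw [hk] at s0
            simp only [Option.map_some, Option.some.injEq] at s0
            simp only [Option.some.injEq]
            omega
        refine ⟨k + 2, ?_, ?_⟩
        · rw [hMc, List.map_cons, List.map_cons]
          rw [PySem.List.index?_cons_of_ne (pvF x :: t.map pvF) hmne,
              PySem.List.index?_cons_of_ne (t.map pvF) hxne, hidx_t]
          rfl
        · have e1 := PySem.List.pyGet?_cons_succ m (x :: t) (k + 1)
          have e2 := PySem.List.pyGet?_cons_succ x t k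
          have e3 := PySem.List.pyGet?_cons_succ m t k
          have hget' : PySem.List.pyGet? t ((k : Nat) : Int) = some (pvPick m t) := by
            rw [← e3]; push_cast at hget ⊢; exact hget
          rw [pvPick, if_neg h]
          push_cast at e1 ⊢
          have htwo : ((k : Int) + 2) = (k : Int) + 1 + 1 := by ring
          rw [htwo, e1, e2, hget']

-- B's loop body from a live state compares ranks
lemma stepB_some (m x : String) :
    pvStepB (some (pvF m), m) x =
      if pvF m < pvF x then (some (pvF x), x) else (some (pvF m), m) := by
  simp [pvStepB, pvF]

-- B's scan started at (some (pvF m), m) computes the running max and pvPick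
lemma scanB (t : List String) : ∀ m : String,
    t.foldl pvStepB (some (pvF m), m) = (some (pvM m t), pvPick m t) := by
  induction t with
  | nil => intro m; simp [pvM, pvPick]
  | cons x t ih =>
    intro m
    rw [List.foldl_cons, stepB_some, pvM_cons, pvPick]
    by_cases h : pvF m < pvF x
    · rw [if_pos h, if_pos h, if_pos h]; exact ih x
    · rw [if_neg h, if_neg h, if_neg h]; exact ih m

-- A's accumulated value_list is the map of pvF
lemma valueListA (l : List String) (acc : List Int) :
    List.foldl (fun acc m => acc ++ [pvSubs.getD m 0]) acc l = acc ++ l.map pvF := by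
  simpa [pvF] using PySem.List.foldl_append_singleton_eq_map (fun m => pvSubs.getD m 0) l acc

-- ===== VERDICT (by name: the statement is the Claim_ definition above) =====
theorem get_latest_month_spec : Claim_equal_get_latest_month := by
  intro month_list _
  unfold Spec_get_latest_month get_latest_month get_latest_month_alt
  cases month_list with
  | nil => simp
  | cons m rest =>
    have hmax : PySem.List.max? ((m :: rest).map pvF) (fun v => v) = some (pvM m rest) := by
      rw [List.map_cons]
      exact PySem.List.max?_id_cons (pvF m) (rest.map pvF)
    obtain ⟨loc, hidx, hget⟩ := indexA rest m
    have h0 : pvStepB (none, "") m = (some (pvF m), m) := by simp [pvStepB, pvF]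
    have hs := scanB rest m
    simp only [List.map_cons, pvF] at hmax hidx hs
    simp only [ne_eq, reduceCtorEq, not_false_eq_true, if_true, List.foldl_cons, valueListA,
      List.nil_append, List.cons_append, pvF, hmax, hidx, hget, h0, hs]
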